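-- pv_equiv track=rewrite | github.com/lincoln-b/adventofcode2017 | day6.py | unloop
-- ===== SOURCE A (Python) =====
-- import copy
--
-- def redistribute(m):
--     mem = copy.copy(m)
--     i = mem.index(max(m))
--     blocks = mem[i]
--     mem[i] = 0
--     i += 1
--     while blocks > 0:
--         if i >= len(mem):
--             i = 0
--         mem[i] += 1
--         i += 1
--         blocks -= 1
--     return mem
--
-- def unloop(mem):
--     s = [str(mem)]
--     steps = 0
--     while 1:
--         mem = redistribute(mem)
--         steps += 1
--         if str(mem) in s:
--             return steps - s.index(str(mem))
--         s.append(str(mem))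
--     return steps
-- ===== SOURCE B (Python) =====
-- import copy
--
-- def redistribute(m):
--     mem = copy.copy(m)
--     i = mem.index(max(m))
--     blocks = mem[i]
--     mem[i] = 0
--     i += 1
--     while blocks > 0:
--         if i >= len(mem):
--             i = 0
--         mem[i] += 1
--         i += 1
--         blocks -= 1
--     return mem
--
-- def unloop(mem):
--     # Floyd's tortoise-and-hare cycle detection: keep no table of states.
--     slow = redistribute(mem)
--     fast = redistribute(slow)
--     while slow != fast:
--         slow = redistribute(slow)
--         fast = redistribute(redistribute(fast))
--     # slow now sits on the cycle; walk once around it to measure its length.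
--     length = 1
--     cur = redistribute(slow)
--     while cur != slow:
--         cur = redistribute(cur)
--         length += 1
--     return length
-- ===== Notes on version B (the rewrite author's own statement) =====
-- stated objective: faster
-- what changed: Replaced the seen-list cycle detection (append str(state) to a list and linear-scan membership/index each step) by Floyd's tortoise-and-hare: two pointer states advanced at speeds 1 and 2 until they meet, then one walk around the cycle counts its length; no table of states is kept.
import Mathlib
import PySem

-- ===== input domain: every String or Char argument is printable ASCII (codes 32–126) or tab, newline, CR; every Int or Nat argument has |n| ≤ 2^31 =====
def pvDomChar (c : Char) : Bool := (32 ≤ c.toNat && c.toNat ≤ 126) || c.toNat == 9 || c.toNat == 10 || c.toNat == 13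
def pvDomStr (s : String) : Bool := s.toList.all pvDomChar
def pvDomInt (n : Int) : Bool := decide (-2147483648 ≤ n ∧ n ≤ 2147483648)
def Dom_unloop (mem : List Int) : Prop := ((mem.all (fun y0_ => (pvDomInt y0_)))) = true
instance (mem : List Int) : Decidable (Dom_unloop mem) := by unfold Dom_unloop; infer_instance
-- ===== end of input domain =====

-- B replaces A's seen-list cycle detection by Floyd's tortoise-and-hare (no table of states);
-- A mutates only a local copy of its argument, so the equivalence is about the return value.

-- ===== PORT A =====

-- the inner `while blocks > 0` of redistribute; every reachable index is in range (Pre_ excludes []),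
-- so the total forms pySetD/pyGetD are exact here
def distLoop (mem : List Int) (i : Int) (blocks : Int) : List Int :=
  if h : 0 < blocks then
    let j : Int := if (mem.length : Int) ≤ i then 0 else i
    distLoop (PySem.List.pySetD mem j (PySem.List.pyGetD mem j 0 + 1)) (j + 1) (blocks - 1)
  else mem
termination_by blocks.toNat
decreasing_by omega

def redistribute (m : List Int) : List Int :=
  let mx := (PySem.List.max? m (fun x => x)).getD 0   -- max(m); ValueError on [] is excluded by Pre_
  let i : Nat := (PySem.List.index? m mx).getD 0       -- mem.index(max(m)); the max is present
  let blocks := PySem.List.pyGetD m (i : Int) 0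
  distLoop (PySem.List.pySetD m (i : Int) 0) ((i : Int) + 1) blocks

-- str(mem): CPython's repr of a list of ints, "[" + ", ".join(str(x) for x) + "]" (byte-exact)
def strList (mem : List Int) : String :=
  String.ofList ('[' :: PySem.Chars.join [',', ' '] (mem.map PySem.Int.toChars) ++ [']'])

-- fuel for the unbounded `while 1`: a closed-form bound on the number of distinct reachable
-- states (+2), proved sufficient below; it only makes the recursion total
def fuelBound (mem : List Int) : Nat :=
  ((mem.sum - ((mem.length : Int) + 1) * (mem.foldl min 0)).toNat + 1) ^ mem.length + 2

def unloopGo (fuel : Nat) (s : List String) (mem : List Int) (steps : Int) : Int :=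
  match fuel with
  | 0 => steps
  | fuel + 1 =>
    let mem' := redistribute mem
    let steps' := steps + 1
    if strList mem' ∈ s then
      steps' - (((PySem.List.index? s (strList mem')).getD 0 : Nat) : Int)
    else unloopGo fuel (s ++ [strList mem']) mem' steps'

def unloop (mem : List Int) : Int := unloopGo (fuelBound mem) [strList mem] mem 0

-- ===== PORT B =====
-- Source B's redistribute helper is character-identical to A's, so the port above is shared;
-- the fuel guards below again only make the two loops total (sufficiency proved below)

def floydMeet (fuel : Nat) (slow fast : List Int) : List Int :=
  match fuel with
  | 0 => slow
  | fuel + 1 =>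
    if slow = fast then slow
    else floydMeet fuel (redistribute slow) (redistribute (redistribute fast))

def cycleLen (fuel : Nat) (cur target : List Int) (length : Int) : Int :=
  match fuel with
  | 0 => length
  | fuel + 1 =>
    if cur = target then length
    else cycleLen fuel (redistribute cur) target (length + 1)

def unloop_alt (mem : List Int) : Int :=
  let slow := redistribute mem
  let fast := redistribute slow
  let meet := floydMeet (fuelBound mem) slow fast
  cycleLen (fuelBound mem) (redistribute meet) meet 1

-- ===== PRECONDITION & SPEC =====
-- Pre_ excludes only the empty list, on which Python A (and B) raise ValueError (max() of empty sequence).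
def Pre_unloop (mem : List Int) : Prop := mem ≠ []
instance (mem : List Int) : Decidable (Pre_unloop mem) := by unfold Pre_unloop; infer_instance
def pvWitness_unloop : List Int := [0, 2, 7, 0]
def Spec_unloop (mem : List Int) (out : Int) : Prop := out = unloop_alt mem
instance (mem : List Int) (out : Int) : Decidable (Spec_unloop mem out) := by unfold Spec_unloop; infer_instance

-- ===== CLAIM (what is proved, stated in full; the proofs are below) =====
def Claim_equal_unloop : Prop := ∀ (mem : List Int), Dom_unloop mem → Pre_unloop mem → Spec_unloop mem (unloop mem)

-- ===== LEMMAS AND PROOFS =====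

-- ---- generic list arithmetic ----


theorem pv_sum_set (l : List Int) (k : Nat) (v : Int) (hk : k < l.length) :
    (l.set k v).sum = l.sum - l.getD k 0 + v := by
  have h3 : l.sum = (l.take k).sum + (l[k] + (l.drop (k + 1)).sum) := by
    conv_lhs => rw [← List.sum_take_add_sum_drop l k]
    rw [List.drop_eq_getElem_cons hk, List.sum_cons]
  have h4 : l.getD k 0 = l[k] := List.getD_eq_getElem l 0 hk
  rw [List.sum_set, h4]
  simp only [hk, if_pos]
  linarith

theorem pv_step_facts (m : List Int) (i : Int) :
    ((PySem.List.pySetD m (if (m.length : Int) ≤ i then 0 else i)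
        (PySem.List.pyGetD m (if (m.length : Int) ≤ i then 0 else i) 0 + 1)).length = m.length) ∧
    (0 ≤ i → ∀ jn : Nat, m.getD jn 0 ≤
      (PySem.List.pySetD m (if (m.length : Int) ≤ i then 0 else i)
        (PySem.List.pyGetD m (if (m.length : Int) ≤ i then 0 else i) 0 + 1)).getD jn 0) ∧
    (0 ≤ i → m ≠ [] →
      (PySem.List.pySetD m (if (m.length : Int) ≤ i then 0 else i)
        (PySem.List.pyGetD m (if (m.length : Int) ≤ i then 0 else i) 0 + 1)).sum = m.sum + 1) := by
  set j : Int := if (m.length : Int) ≤ i then 0 else i with hj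
  refine ⟨PySem.List.length_pySetD m j _, ?_, ?_⟩
  · intro hi jn
    by_cases hm : m = []
    · have he : PySem.List.pySetD m j (PySem.List.pyGetD m j 0 + 1) = [] := by
        refine List.length_eq_zero_iff.mp ?_
        rw [PySem.List.length_pySetD, hm]; rfl
      simp [hm]
    · have hlen : 0 < m.length := List.length_pos_iff.mpr hm
      have hj0 : 0 ≤ j := by rw [hj]; split <;> omega
      have hjl : j < (m.length : Int) := by rw [hj]; split <;> omega
      have hk : j.toNat < m.length := by omega
      rw [PySem.List.pySetD_of_nonneg m _ hj0, PySem.List.pyGetD_eq_getElem m 0 hj0 hjl]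
      rcases eq_or_ne jn j.toNat with rfl | hne
      · rw [List.getD_eq_getElem _ _ hk, List.getD_eq_getElem _ _ (by simp [hk])]
        simp
      · rw [List.getD_eq_getElem?_getD, List.getD_eq_getElem?_getD, List.getElem?_set]
        simp [hne.symm]
  · intro hi hm
    have hlen : 0 < m.length := List.length_pos_iff.mpr hm
    have hj0 : 0 ≤ j := by rw [hj]; split <;> omega
    have hjl : j < (m.length : Int) := by rw [hj]; split <;> omega
    have hk : j.toNat < m.length := by omega
    rw [PySem.List.pySetD_of_nonneg m _ hj0, PySem.List.pyGetD_eq_getElem m 0 hj0 hjl]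
    rw [pv_sum_set _ _ _ hk, List.getD_eq_getElem _ _ hk]
    ring

-- ---- distLoop invariants ----

theorem distLoop_length (b : Int) (mem : List Int) (i : Int) :
    (distLoop mem i b).length = mem.length := by
  induction hn : b.toNat using Nat.strong_induction_on generalizing b mem i with
  | _ n ih =>
    rw [distLoop]
    split
    · next h =>
      rw [ih (b - 1).toNat (by omega) (b - 1) _ _ rfl]
      exact (pv_step_facts mem i).1
    · rfl

theorem distLoop_getD_le (b : Int) (mem : List Int) (i : Int) (hi : 0 ≤ i) (j : Nat) :
    mem.getD j 0 ≤ (distLoop mem i b).getD j 0 := by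
  induction hn : b.toNat using Nat.strong_induction_on generalizing b mem i with
  | _ n ih =>
    rw [distLoop]
    split
    · next h =>
      refine le_trans ((pv_step_facts mem i).2.1 hi j) ?_
      exact ih (b - 1).toNat (by omega) (b - 1) _ _ (by split <;> omega) rfl
    · exact le_refl _

theorem distLoop_sum (b : Int) (mem : List Int) (i : Int) (hi : 0 ≤ i) (hm : mem ≠ []) :
    (distLoop mem i b).sum = mem.sum + max b 0 := by
  induction hn : b.toNat using Nat.strong_induction_on generalizing b mem i with
  | _ n ih =>
    rw [distLoop]
    split
    · next h =>
      rw [ih (b - 1).toNat (by omega) (b - 1) _ _ (by split <;> omega)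
        (by
          intro hc
          apply hm
          refine List.length_eq_zero_iff.mp ?_
          have := congrArg List.length hc
          rw [PySem.List.length_pySetD] at this
          simpa using this)
        rfl]
      rw [(pv_step_facts mem i).2.2 hi hm]
      omega
    · next h => omega

theorem distLoop_nonpos (b : Int) (mem : List Int) (i : Int) (hb : ¬ 0 < b) :
    distLoop mem i b = mem := by
  rw [distLoop]
  simp [hb]

-- ---- the state invariant ----

def InvP (mem0 m : List Int) : Prop :=
  m.length = mem0.length ∧ (∀ x ∈ m, mem0.foldl min 0 ≤ x) ∧
  m.sum ≤ mem0.sum - mem0.foldl min 0 ∧ ((∀ x ∈ m, x < 0) → m.sum ≤ mem0.sum)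

theorem invP_init (mem0 : List Int) : InvP mem0 mem0 := by
  have hL0 : mem0.foldl min 0 ≤ 0 := (PySem.List.foldl_min_le mem0 0).1
  exact ⟨rfl, fun x hx => (PySem.List.foldl_min_le mem0 0).2 x hx, by omega, fun _ => le_refl _⟩

theorem invP_upper {mem0 m : List Int} (h : InvP mem0 m) {x : Int} (hx : x ∈ m) :
    x ≤ mem0.sum - (mem0.length : Int) * mem0.foldl min 0 := by
  obtain ⟨hlen, hlow, hsum, -⟩ := h
  have hL0 : mem0.foldl min 0 ≤ 0 := (PySem.List.foldl_min_le mem0 0).1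
  have hperm : m.Perm (x :: m.erase x) := List.perm_cons_erase hx
  have hsx : m.sum = x + (m.erase x).sum := by
    rw [hperm.sum_eq, List.sum_cons]
  have helow : ∀ y ∈ m.erase x, mem0.foldl min 0 ≤ y :=
    fun y hy => hlow y (List.mem_of_mem_erase hy)
  have hesum : ((m.erase x).length : Int) * mem0.foldl min 0 ≤ (m.erase x).sum := by
    have := List.card_nsmul_le_sum (m.erase x) (mem0.foldl min 0) helow
    rwa [nsmul_eq_mul] at this
  have helen : (m.erase x).length = m.length - 1 := List.length_erase_of_mem hx
  have hmpos : 0 < m.length := List.length_pos_iff.mpr (List.ne_nil_of_mem hx)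
  have hcast : ((m.erase x).length : Int) = (mem0.length : Int) - 1 := by
    rw [helen, hlen]
    have : 0 < mem0.length := by omega
    push_cast [Nat.cast_sub (by omega : 1 ≤ mem0.length)]
    ring
  rw [hcast] at hesum
  nlinarith [hL0]

theorem invP_redistribute {mem0 m : List Int} (h : InvP mem0 m) (hm : m ≠ []) :
    InvP mem0 (redistribute m) := by
  obtain ⟨hlen, hlow, hsum, hneg⟩ := h
  have hL0 : mem0.foldl min 0 ≤ 0 := (PySem.List.foldl_min_le mem0 0).1
  obtain ⟨mx, hmx⟩ : ∃ mx, PySem.List.max? m (fun x => x) = some mx := by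
    cases hmax : PySem.List.max? m (fun x => x) with
    | none => exact absurd ((PySem.List.max?_eq_none_iff m _).mp hmax) hm
    | some v => exact ⟨v, rfl⟩
  have hmxm : mx ∈ m := PySem.List.max?_mem hmx
  have hmax : ∀ y ∈ m, y ≤ mx := fun y hy => PySem.List.max?_isMax hmx y hy
  obtain ⟨iN, hidx⟩ : ∃ iN, PySem.List.index? m mx = some iN :=
    Option.isSome_iff_exists.mp ((PySem.List.index?_isSome_iff m mx).mpr hmxm)
  obtain ⟨hiN, hgi, -⟩ := PySem.List.getElem_of_index?_eq_some hidx
  have hred : redistribute m = distLoop (m.set iN 0) ((iN : Int) + 1) mx := by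
    simp only [redistribute, hmx, hidx, Option.getD_some, PySem.List.pySetD_natCast,
      PySem.List.pyGetD_natCast]
    rw [List.getD_eq_getElem _ _ hiN, hgi]
  have hm1len : (m.set iN 0).length = m.length := by simp
  have hm1ne : m.set iN 0 ≠ [] := by
    intro hc
    have := congrArg List.length hc
    rw [hm1len] at this
    exact hm (List.length_eq_zero_iff.mp (by simpa using this))
  have hm1low : ∀ x ∈ m.set iN 0, mem0.foldl min 0 ≤ x := by
    intro x hx
    obtain ⟨j, hj, rfl⟩ := List.mem_iff_getElem.mp hx
    rw [List.getElem_set]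
    split
    · exact hL0
    · exact hlow _ (List.getElem_mem _)
  have hm1sum : (m.set iN 0).sum = m.sum - mx := by
    rw [pv_sum_set _ _ _ hiN, List.getD_eq_getElem _ _ hiN, hgi]
    ring
  have hreslen : (redistribute m).length = m.length := by
    rw [hred, distLoop_length, hm1len]
  by_cases hmx0 : 0 ≤ mx
  · have hres_sum : (redistribute m).sum = m.sum := by
      rw [hred, distLoop_sum _ _ _ (by omega) hm1ne, hm1sum, max_eq_left hmx0]
      ring
    have hres_low : ∀ x ∈ redistribute m, mem0.foldl min 0 ≤ x := by
      intro x hx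
      obtain ⟨j, hj, rfl⟩ := List.mem_iff_getElem.mp hx
      have hj1 : j < (m.set iN 0).length := by rw [hm1len]; rw [hreslen] at hj; exact hj
      have h1 : mem0.foldl min 0 ≤ (m.set iN 0).getD j 0 := by
        rw [List.getD_eq_getElem _ _ hj1]
        exact hm1low _ (List.getElem_mem _)
      have h2 : (m.set iN 0).getD j 0 ≤ (redistribute m).getD j 0 := by
        rw [hred]
        exact distLoop_getD_le mx (m.set iN 0) ((iN : Int) + 1) (by omega) j
      have h3 : (redistribute m).getD j 0 = (redistribute m)[j] :=
        List.getD_eq_getElem _ _ hj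
      rw [← h3]
      omega
    have hpos : ∃ x ∈ redistribute m, 0 ≤ x := by
      have hiN' : iN < (redistribute m).length := by rw [hreslen]; exact hiN
      refine ⟨(redistribute m)[iN], List.getElem_mem _, ?_⟩
      have h1 : (m.set iN 0).getD iN 0 = 0 := by
        rw [List.getD_eq_getElem _ _ (by simpa using hiN), List.getElem_set]
        simp
      have h2 : (m.set iN 0).getD iN 0 ≤ (redistribute m).getD iN 0 := by
        rw [hred]
        exact distLoop_getD_le mx (m.set iN 0) ((iN : Int) + 1) (by omega) iN
      have h3 : (redistribute m).getD iN 0 = (redistribute m)[iN] :=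
        List.getD_eq_getElem _ _ hiN'
      rw [← h3]
      omega
    refine ⟨by rw [hreslen]; exact hlen, hres_low, by rw [hres_sum]; exact hsum, ?_⟩
    intro hall
    obtain ⟨x, hx, hx0⟩ := hpos
    exact absurd (hall x hx) (by omega)
  · have hallneg : ∀ x ∈ m, x < 0 := fun x hx => lt_of_le_of_lt (hmax x hx) (by omega)
    have hres : redistribute m = m.set iN 0 := by
      rw [hred]
      exact distLoop_nonpos _ _ _ (by omega)
    have hLmx : mem0.foldl min 0 ≤ mx := hlow mx hmxm
    have hms : m.sum ≤ mem0.sum := hneg hallneg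
    refine ⟨by rw [hreslen]; exact hlen, ?_, ?_, ?_⟩
    · intro x hx; rw [hres] at hx; exact hm1low x hx
    · rw [hres, hm1sum]; linarith
    · intro hall
      exfalso
      have h0 : (0 : Int) ∈ redistribute m := by
        rw [hres]
        refine List.mem_iff_getElem.mpr ⟨iN, by simpa using hiN, ?_⟩
        rw [List.getElem_set]; simp
      exact absurd (hall 0 h0) (by omega)

theorem invP_seq {mem0 : List Int} (hne : mem0 ≠ []) (k : Nat) :
    InvP mem0 (redistribute^[k] mem0) := by
  induction k with
  | zero => exact invP_init mem0
  | succ k ih =>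
    rw [Function.iterate_succ_apply']
    refine invP_redistribute ih ?_
    intro hc
    have := congrArg List.length hc
    rw [ih.1] at this
    exact hne (List.length_eq_zero_iff.mp (by simpa using this))

theorem seq_length {mem0 : List Int} (hne : mem0 ≠ []) (k : Nat) :
    (redistribute^[k] mem0).length = mem0.length :=
  (invP_seq hne k).1

-- ---- pigeonhole: a collision exists within the closed-form bound ----

theorem exists_collision {mem0 : List Int} (hne : mem0 ≠ []) :
    ∃ a b : Nat, a < b ∧ b ≤ fuelBound mem0 - 2 ∧
      redistribute^[a] mem0 = redistribute^[b] mem0 := by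
  set L := mem0.foldl min 0 with hL
  set S := mem0.sum with hS
  set n := mem0.length with hn
  set UB := S - (n : Int) * L with hUB
  set w := (S - ((n : Int) + 1) * L).toNat + 1 with hw
  have hfb : fuelBound mem0 - 2 = w ^ n := by
    simp [fuelBound, ← hL, ← hS, ← hn, ← hw]
  have hcard : Fintype.card (Fin n → (Finset.Icc L UB : Finset Int)) < Fintype.card (Fin (w ^ n + 1)) := by
    rw [Fintype.card_fun, Fintype.card_coe, Fintype.card_fin, Fintype.card_fin, Int.card_Icc]
    have hub' : UB + 1 - L = S - ((n : Int) + 1) * L + 1 := by rw [hUB]; ring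
    have h1 : (UB + 1 - L).toNat ≤ w := by rw [hub', hw]; omega
    calc (UB + 1 - L).toNat ^ n ≤ w ^ n := Nat.pow_le_pow_left h1 n
    _ < w ^ n + 1 := by omega
  have hmem : ∀ (k : Nat) (j : Fin n), (redistribute^[k] mem0).getD j 0 ∈ Finset.Icc L UB := by
    intro k j
    have inv := invP_seq hne k
    have hjl : (j : Nat) < (redistribute^[k] mem0).length := by rw [inv.1, ← hn]; exact j.2
    rw [List.getD_eq_getElem _ _ hjl]
    exact Finset.mem_Icc.mpr ⟨inv.2.1 _ (List.getElem_mem _), invP_upper inv (List.getElem_mem _)⟩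
  obtain ⟨k, k', hkk, heq⟩ := Fintype.exists_ne_map_eq_of_card_lt
    (fun (k : Fin (w ^ n + 1)) (j : Fin n) =>
      (⟨(redistribute^[(k : Nat)] mem0).getD j 0, hmem k j⟩ : (Finset.Icc L UB : Finset Int)))
    hcard
  have hseqeq : redistribute^[(k : Nat)] mem0 = redistribute^[(k' : Nat)] mem0 := by
    refine List.ext_getElem ?_ ?_
    · rw [(invP_seq hne _).1, (invP_seq hne _).1]
    · intro i h1 h2
      have hi : i < n := by
        rw [hn, ← (invP_seq hne (k : Nat)).1]; exact h1
      have hval := congrArg Subtype.val (congrFun heq ⟨i, hi⟩)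
      have hval2 : (redistribute^[(k : Nat)] mem0).getD i 0
          = (redistribute^[(k' : Nat)] mem0).getD i 0 := hval
      rw [List.getD_eq_getElem _ _ h1, List.getD_eq_getElem _ _ h2] at hval2
      exact hval2
  rw [hfb]
  rcases Nat.lt_or_ge (k : Nat) (k' : Nat) with hlt | hge
  · exact ⟨k, k', hlt, by omega, hseqeq⟩
  · have hlt : (k' : Nat) < (k : Nat) :=
      lt_of_le_of_ne hge (fun hc => hkk (Fin.ext hc.symm))
    exact ⟨k', k, hlt, by omega, hseqeq.symm⟩

-- ---- string-repr injectivity ----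

def digitsN (n : Nat) : List Char :=
  if h : n < 10 then [Nat.digitChar n]
  else digitsN (n / 10) ++ [Nat.digitChar (n % 10)]
termination_by n
decreasing_by exact Nat.div_lt_self (by omega) (by omega)

theorem digitChar_toNat {k : Nat} (hk : k < 10) : (Nat.digitChar k).toNat = k + 48 := by
  interval_cases k <;> decide

theorem digitsN_mem (n : Nat) : ∀ c ∈ digitsN n, 48 ≤ c.toNat ∧ c.toNat ≤ 57 := by
  induction n using Nat.strong_induction_on with
  | _ n ih =>
    rw [digitsN]
    split
    · next h =>
      intro c hc
      simp only [List.mem_singleton] at hc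
      subst hc
      rw [digitChar_toNat h]
      omega
    · next h =>
      intro c hc
      rcases List.mem_append.mp hc with hc | hc
      · exact ih (n / 10) (Nat.div_lt_self (by omega) (by omega)) c hc
      · simp only [List.mem_singleton] at hc
        subst hc
        rw [digitChar_toNat (Nat.mod_lt _ (by omega))]
        have := Nat.mod_lt n (y := 10) (by omega)
        omega

def pvVal (cs : List Char) : Nat := cs.foldl (fun a c => a * 10 + (c.toNat - 48)) 0

theorem pvVal_digits_aux (n : Nat) : ∀ a : Nat,
    (digitsN n).foldl (fun a c => a * 10 + (c.toNat - 48)) a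
      = a * 10 ^ (digitsN n).length + n := by
  induction n using Nat.strong_induction_on with
  | _ n ih =>
    intro a
    rw [digitsN]
    split
    · next h =>
      simp only [List.foldl_cons, List.foldl_nil, List.length_singleton]
      rw [digitChar_toNat h, pow_one]
      omega
    · next h =>
      rw [List.foldl_append, ih (n / 10) (Nat.div_lt_self (by omega) (by omega)) a]
      simp only [List.foldl_cons, List.foldl_nil, List.length_append, List.length_singleton]
      rw [digitChar_toNat (Nat.mod_lt _ (by omega)), pow_succ, ← mul_assoc]
      have hdm := Nat.div_add_mod n 10
      have hm := Nat.mod_lt n (y := 10) (by omega)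
      omega

theorem digitsN_inj {n m : Nat} (h : digitsN n = digitsN m) : n = m := by
  have h1 := pvVal_digits_aux n 0
  have h2 := pvVal_digits_aux m 0
  rw [h] at h1
  omega

theorem toChars_eq (z : Int) :
    PySem.Int.toChars z = if z < 0 then '-' :: digitsN z.natAbs else digitsN z.toNat := by
  have hbridge : ∀ (f m : Nat) (acc : List Char), m < f →
      Nat.toDigitsCore 10 f m acc = digitsN m ++ acc := by
    intro f
    induction f with
    | zero => intro m acc h; omega
    | succ f ih =>
      intro m acc h
      show Nat.toDigitsCore 10 (f + 1) m acc = _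
      rw [Nat.toDigitsCore]
      by_cases h0 : m / 10 = 0
      · have hm10 : m < 10 := by omega
        simp only [h0, if_pos]
        rw [digitsN]
        simp [hm10, Nat.mod_eq_of_lt hm10]
      · rw [if_neg h0]
        rw [ih (m / 10) _ (by
          have h1 : m / 10 < m := Nat.div_lt_self (by omega) (by omega)
          omega)]
        conv_rhs => rw [digitsN]
        have : ¬ m < 10 := by omega
        simp [this]
    
  unfold PySem.Int.toChars Nat.toDigits
  split
  · rw [hbridge _ _ _ (by omega)]
    simp
  · rw [hbridge _ _ _ (by omega)]
    simp

theorem noComma_toChars (z : Int) : ',' ∉ PySem.Int.toChars z := by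
  rw [toChars_eq]
  intro hc
  split at hc
  · rcases List.mem_cons.mp hc with h | h
    · exact absurd h (by decide)
    · exact absurd (digitsN_mem _ _ h) (by decide)
  · exact absurd (digitsN_mem _ _ hc) (by decide)

theorem toChars_inj {z w : Int} (h : PySem.Int.toChars z = PySem.Int.toChars w) : z = w := by
  rw [toChars_eq, toChars_eq] at h
  have hdash : ∀ m : Nat, '-' ∉ digitsN m := by
    intro m hc
    exact absurd (digitsN_mem _ _ hc) (by decide)
  split at h <;> split at h
  · next h1 h2 =>
    injection h with h3 h4
    have := digitsN_inj h4
    omega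
  · next h1 h2 =>
    exact absurd (h ▸ List.mem_cons_self) (hdash _)
  · next h1 h2 =>
    exact absurd (h.symm ▸ List.mem_cons_self) (hdash _)
  · next h1 h2 =>
    have := digitsN_inj h
    omega

theorem comma_split : ∀ (t1 t2 u1 u2 : List Char), ',' ∉ t1 → ',' ∉ t2 →
    t1 ++ ',' :: u1 = t2 ++ ',' :: u2 → t1 = t2 ∧ u1 = u2 := by
  intro t1
  induction t1 with
  | nil =>
    intro t2 u1 u2 h1 h2 he
    cases t2 with
    | nil => simpa using he
    | cons d t2' =>
      exfalso
      simp only [List.nil_append, List.cons_append, List.cons.injEq] at he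
      exact h2 (he.1 ▸ List.mem_cons_self)
  | cons c t1' ih =>
    intro t2 u1 u2 h1 h2 he
    cases t2 with
    | nil =>
      exfalso
      simp only [List.nil_append, List.cons_append, List.cons.injEq] at he
      exact h1 (he.1 ▸ List.mem_cons_self)
    | cons d t2' =>
      simp only [List.cons_append, List.cons.injEq] at he
      obtain ⟨hcd, hrest⟩ := he
      obtain ⟨hts, hus⟩ := ih t2' u1 u2 (fun hc => h1 (List.mem_cons_of_mem _ hc))
        (fun hc => h2 (List.mem_cons_of_mem _ hc)) hrest
      exact ⟨by rw [hcd, hts], hus⟩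

theorem join_inj : ∀ (xs ys : List (List Char)), xs.length = ys.length →
    (∀ t ∈ xs, ',' ∉ t) → (∀ t ∈ ys, ',' ∉ t) →
    PySem.Chars.join [',', ' '] xs = PySem.Chars.join [',', ' '] ys → xs = ys := by
  intro xs
  induction xs with
  | nil =>
    intro ys hlen _ _ _
    cases ys with
    | nil => rfl
    | cons y ys' => simp at hlen
  | cons x xs' ih =>
    intro ys hlen hx hy hj
    cases ys with
    | nil => simp at hlen
    | cons y ys' =>
      cases xs' with
      | nil =>
        cases ys' with
        | nil =>
          rw [PySem.Chars.join_singleton, PySem.Chars.join_singleton] at hj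
          rw [hj]
        | cons b bs => simp at hlen
      | cons a as =>
        cases ys' with
        | nil => simp at hlen
        | cons b bs =>
          rw [PySem.Chars.join_cons_cons, PySem.Chars.join_cons_cons] at hj
          have hj' : x ++ ',' :: (' ' :: PySem.Chars.join [',', ' '] (a :: as))
              = y ++ ',' :: (' ' :: PySem.Chars.join [',', ' '] (b :: bs)) := by
            simpa [List.append_assoc] using hj
          obtain ⟨hxy, hu⟩ := comma_split _ _ _ _ (hx x List.mem_cons_self)
            (hy y List.mem_cons_self) hj'
          have hu' : PySem.Chars.join [',', ' '] (a :: as)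
              = PySem.Chars.join [',', ' '] (b :: bs) := by
            simpa using hu
          have htail := ih (b :: bs) (by simpa using hlen)
            (fun t ht => hx t (List.mem_cons_of_mem _ ht))
            (fun t ht => hy t (List.mem_cons_of_mem _ ht)) hu'
          rw [hxy, htail]

theorem strList_inj {l1 l2 : List Int} (h : l1.length = l2.length)
    (he : strList l1 = strList l2) : l1 = l2 := by
  unfold strList at he
  have he2 := String.ofList_inj.mp he
  injection he2 with hhead htail
  have he3 := List.append_cancel_right htail
  have he4 : l1.map PySem.Int.toChars = l2.map PySem.Int.toChars := by
    refine join_inj _ _ (by simp [h]) ?_ ?_ he3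
    · intro t ht
      obtain ⟨z, -, rfl⟩ := List.mem_map.mp ht
      exact noComma_toChars z
    · intro t ht
      obtain ⟨z, -, rfl⟩ := List.mem_map.mp ht
      exact noComma_toChars z
  exact List.map_injective_iff.mpr (fun a b hab => toChars_inj hab) he4

-- ---- loop A computes T - J ----

theorem unloopGo_eq {mem0 : List Int} (T J : Nat)
    (hlen : ∀ t, (redistribute^[t] mem0).length = mem0.length)
    (hJT : J < T) (hseq : redistribute^[J] mem0 = redistribute^[T] mem0)
    (hTmin : ∀ t, t < T → ∀ i, i < t → redistribute^[i] mem0 ≠ redistribute^[t] mem0)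
    (hJmin : ∀ j, j < J → redistribute^[j] mem0 ≠ redistribute^[T] mem0) :
    ∀ fuel k, k < T → T ≤ k + fuel →
      unloopGo fuel ((List.range (k + 1)).map (fun t => strList (redistribute^[t] mem0)))
        (redistribute^[k] mem0) (k : Int) = (T : Int) - (J : Int) := by
  intro fuel
  induction fuel with
  | zero => intro k hk hT; exact absurd hT (by omega)
  | succ fuel ih =>
    intro k hk hT
    have hm' : redistribute (redistribute^[k] mem0) = redistribute^[k + 1] mem0 :=
      (Function.iterate_succ_apply' redistribute k mem0).symm
    simp only [unloopGo, hm']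
    rcases (by omega : k + 1 = T ∨ k + 1 < T) with hT' | hT'
    · have hv : strList (redistribute^[k + 1] mem0) = strList (redistribute^[J] mem0) := by
        rw [hT', ← hseq]
      have hsplit : List.range (k + 1) = List.range J ++
          (J + 0) :: (List.range (k - J)).map (fun x => J + x.succ) := by
        have h2 : (List.range ((k - J) + 1)).map (fun x => J + x)
            = (J + 0) :: (List.range (k - J)).map (fun x => J + x.succ) := by
          rw [List.range_succ_eq_map]
          simp [List.map_map, Function.comp]
        rw [← h2, ← List.range_add]
        congr 1
        omega
      have hidx : PySem.List.index?
          ((List.range (k + 1)).map (fun t => strList (redistribute^[t] mem0)))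
          (strList (redistribute^[k + 1] mem0)) = some J := by
        rw [PySem.List.index?_eq_some_iff]
        refine ⟨(List.range J).map (fun t => strList (redistribute^[t] mem0)),
          ((List.range (k - J)).map (fun x => J + x.succ)).map
            (fun t => strList (redistribute^[t] mem0)), ?_, by simp, ?_⟩
        · rw [hsplit]
          simp only [List.map_append, List.map_cons, Nat.add_zero, hv]
        · intro hc
          obtain ⟨j, hj, hje⟩ := List.mem_map.mp hc
          have hjJ : j < J := List.mem_range.mp hj
          have heq2 : redistribute^[j] mem0 = redistribute^[k + 1] mem0 :=
            strList_inj (by rw [hlen, hlen]) hje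
          rw [hT'] at heq2
          exact hJmin j hjJ heq2
      have hmem : strList (redistribute^[k + 1] mem0) ∈
          (List.range (k + 1)).map (fun t => strList (redistribute^[t] mem0)) := by
        refine List.mem_map.mpr ⟨J, List.mem_range.mpr (by omega), ?_⟩
        exact hv.symm
      rw [if_pos hmem, hidx]
      simp only [Option.getD_some]
      omega
    · have hnmem : ¬ strList (redistribute^[k + 1] mem0) ∈
          (List.range (k + 1)).map (fun t => strList (redistribute^[t] mem0)) := by
        intro hc
        obtain ⟨j, hj, hje⟩ := List.mem_map.mp hc
        exact hTmin (k + 1) hT' j (List.mem_range.mp hj)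
          (strList_inj (by rw [hlen, hlen]) hje)
      rw [if_neg hnmem]
      have hs : (List.range (k + 1)).map (fun t => strList (redistribute^[t] mem0))
          ++ [strList (redistribute^[k + 1] mem0)]
          = (List.range (k + 1 + 1)).map (fun t => strList (redistribute^[t] mem0)) := by
        rw [List.range_succ (n := k + 1)]
        simp
      rw [hs]
      have hsteps : (k : Int) + 1 = ((k + 1 : Nat) : Int) := by push_cast; ring
      rw [hsteps]
      exact ih (k + 1) (by omega) (by omega)

-- ---- loop B: Floyd meet and cycle length ----

theorem floydMeet_eq {mem0 : List Int} (M : Nat) (hM1 : 1 ≤ M)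
    (hMeq : redistribute^[M] mem0 = redistribute^[2 * M] mem0)
    (hMmin : ∀ m, m < M → 1 ≤ m → redistribute^[m] mem0 ≠ redistribute^[2 * m] mem0) :
    ∀ fuel i, 1 ≤ i → i ≤ M → M ≤ i + fuel →
      floydMeet fuel (redistribute^[i] mem0) (redistribute^[2 * i] mem0) =
        redistribute^[M] mem0 := by
  intro fuel
  induction fuel with
  | zero =>
    intro i h1 h2 h3
    have : i = M := by omega
    subst this
    rfl
  | succ fuel ih =>
    intro i h1 h2 h3
    simp only [floydMeet]
    by_cases heq : redistribute^[i] mem0 = redistribute^[2 * i] mem0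
    · rw [if_pos heq]
      have : i = M := by
        rcases Nat.lt_or_ge i M with hlt | hge
        · exact absurd heq (hMmin i hlt h1)
        · omega
      rw [this]
    · rw [if_neg heq]
      have hiM : i < M := by
        rcases Nat.lt_or_ge i M with hlt | hge
        · exact hlt
        · have : i = M := by omega
          subst this
          exact absurd hMeq heq
      have e1 : redistribute (redistribute^[i] mem0) = redistribute^[i + 1] mem0 :=
        (Function.iterate_succ_apply' redistribute i mem0).symm
      have e2 : redistribute (redistribute (redistribute^[2 * i] mem0))
          = redistribute^[2 * (i + 1)] mem0 := by
        rw [show 2 * (i + 1) = (2 * i + 1) + 1 by ring, Function.iterate_succ_apply',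
          Function.iterate_succ_apply']
      rw [e1, e2]
      exact ih (i + 1) (by omega) (by omega) (by omega)

theorem cycleLen_eq (y : List Int) (q : Nat)
    (hq : q = Function.minimalPeriod redistribute y) (hy : y ∈ Function.periodicPts redistribute) :
    ∀ fuel c, 1 ≤ c → c ≤ q → q ≤ c + fuel →
      cycleLen fuel (redistribute^[c] y) y (c : Int) = (q : Int) := by
  intro fuel
  induction fuel with
  | zero =>
    intro c h1 h2 h3
    have : c = q := by omega
    subst this
    rfl
  | succ fuel ih =>
    intro c h1 h2 h3
    simp only [cycleLen]
    by_cases heq : redistribute^[c] y = y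
    · rw [if_pos heq]
      have hle : q ≤ c := by
        rw [hq]
        exact Function.IsPeriodicPt.minimalPeriod_le (by omega) heq
      congr 1
      omega
    · rw [if_neg heq]
      have hcq : c < q := by
        rcases Nat.lt_or_ge c q with hlt | hge
        · exact hlt
        · have : c = q := by omega
          subst this
          exact absurd (hq ▸ Function.iterate_minimalPeriod) heq
      have e1 : redistribute (redistribute^[c] y) = redistribute^[c + 1] y :=
        (Function.iterate_succ_apply' redistribute c y).symm
      have e2 : (c : Int) + 1 = ((c + 1 : Nat) : Int) := by push_cast; ring
      rw [e1, e2]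
      exact ih (c + 1) (by omega) (by omega) (by omega)

-- ---- periodicity helpers ----

theorem seq_period_mul {mem0 : List Int} {J T : Nat} (hJT : J < T)
    (hseq : redistribute^[J] mem0 = redistribute^[T] mem0) :
    ∀ a k, J ≤ a → redistribute^[a + k * (T - J)] mem0 = redistribute^[a] mem0 := by
  have hone : ∀ a, J ≤ a → redistribute^[a + (T - J)] mem0 = redistribute^[a] mem0 := by
    intro a ha
    have h1 : a + (T - J) = (a - J) + T := by omega
    have h3 : (a - J) + J = a := by omega
    rw [h1, Function.iterate_add_apply, ← hseq, ← Function.iterate_add_apply, h3]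
  intro a k ha
  induction k with
  | zero => simp
  | succ k ih =>
    have h4 : a + (k + 1) * (T - J) = (a + k * (T - J)) + (T - J) := by ring
    rw [h4, hone _ (by omega), ih]

-- ===== VERDICT (by name: the statement is the Claim_ definition above) =====
theorem unloop_spec : Claim_equal_unloop := by
  classical
  intro mem _hdom hpre
  unfold Spec_unloop
  have hne : mem ≠ [] := hpre
  have hlen : ∀ t, (redistribute^[t] mem).length = mem.length := seq_length hne
  have hfb2 : 2 ≤ fuelBound mem := by unfold fuelBound; omega
  obtain ⟨a0, b0, hab, hbB, hcol⟩ := exists_collision hne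
  have hex : ∃ t, ∃ j, j < t ∧ redistribute^[j] mem = redistribute^[t] mem :=
    ⟨b0, a0, hab, hcol⟩
  set T := Nat.find hex with hT
  have hPT : ∃ j, j < T ∧ redistribute^[j] mem = redistribute^[T] mem := Nat.find_spec hex
  have hTmin : ∀ t, t < T → ∀ i, i < t → redistribute^[i] mem ≠ redistribute^[t] mem := by
    intro t ht i hit hc
    exact Nat.find_min hex ht ⟨i, hit, hc⟩
  have hTB : T ≤ fuelBound mem - 2 :=
    le_trans (Nat.find_min' hex ⟨a0, hab, hcol⟩) hbB
  set J := Nat.find hPT with hJdef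
  have hJ : J < T ∧ redistribute^[J] mem = redistribute^[T] mem := Nat.find_spec hPT
  have hJmin : ∀ j, j < J → redistribute^[j] mem ≠ redistribute^[T] mem := by
    intro j hj hc
    exact Nat.find_min hPT hj ⟨lt_trans hj hJ.1, hc⟩
  clear_value T
  set p := T - J with hpdef
  have hp1 : 1 ≤ p := by omega
  clear_value J
  -- A computes T - J
  have hA : unloop mem = (T : Int) - (J : Int) := by
    have h0 := unloopGo_eq T J hlen hJ.1 hJ.2 hTmin hJmin (fuelBound mem) 0
      (by omega) (by omega)
    simpa [unloop] using h0
  -- Floyd: least meeting point M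
  have hperiod := seq_period_mul hJ.1 hJ.2
  have hdm2 : (J / p) * p + J % p = J := by
    rw [mul_comm]
    exact Nat.div_add_mod J p
  have hmod : J % p < p := Nat.mod_lt J (y := p) (by omega)
  have hexp : (J / p + 1) * p = (J / p) * p + p := by ring
  have hm0J : J ≤ (J / p + 1) * p := by omega
  have hm0meet : redistribute^[2 * ((J / p + 1) * p)] mem
      = redistribute^[(J / p + 1) * p] mem := by
    rw [show 2 * ((J / p + 1) * p) = (J / p + 1) * p + (J / p + 1) * p by ring]
    exact hperiod _ (J / p + 1) hm0J
  have hm0ex : ∃ m, 1 ≤ m ∧ redistribute^[m] mem = redistribute^[2 * m] mem :=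
    ⟨(J / p + 1) * p, Nat.succ_le_of_lt (Nat.mul_pos (Nat.succ_pos _) (by omega)), hm0meet.symm⟩
  set M := Nat.find hm0ex with hMdef
  have hM : 1 ≤ M ∧ redistribute^[M] mem = redistribute^[2 * M] mem := Nat.find_spec hm0ex
  have hMmin : ∀ m, m < M → 1 ≤ m → redistribute^[m] mem ≠ redistribute^[2 * m] mem := by
    intro m hm h1 hc
    exact Nat.find_min hm0ex hm ⟨h1, hc⟩
  have hMle2 : M ≤ (J / p + 1) * p :=
    Nat.find_min' hm0ex ⟨Nat.succ_le_of_lt (Nat.mul_pos (Nat.succ_pos _) (by omega)), hm0meet.symm⟩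
  clear_value M
  have hMT : M ≤ T := by
    have hwit : (J / p + 1) * p ≤ T := by
      have := Nat.div_mul_le_self J p
      omega
    omega
  have hmeet := floydMeet_eq M hM.1 hM.2 hMmin (fuelBound mem) 1 le_rfl hM.1 (by omega)
  -- the meeting state is periodic
  have hyper : Function.IsPeriodicPt redistribute M (redistribute^[M] mem) := by
    show redistribute^[M] (redistribute^[M] mem) = redistribute^[M] mem
    rw [← Function.iterate_add_apply, ← two_mul]
    exact hM.2.symm
  have hy_mem : redistribute^[M] mem ∈ Function.periodicPts redistribute :=
    Function.mk_mem_periodicPts (by omega) hyper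
  set q := Function.minimalPeriod redistribute (redistribute^[M] mem) with hqdef
  have hqpos : 0 < q := Function.IsPeriodicPt.minimalPeriod_pos (by omega) hyper
  have hqM : q ≤ M := Function.IsPeriodicPt.minimalPeriod_le (by omega) hyper
  -- seq J is periodic with minimal period exactly p
  have hpJ : Function.IsPeriodicPt redistribute p (redistribute^[J] mem) := by
    show redistribute^[p] (redistribute^[J] mem) = redistribute^[J] mem
    rw [← Function.iterate_add_apply]
    have hpJT : p + J = T := by omega
    rw [hpJT, ← hJ.2]
  have hJ_mem : redistribute^[J] mem ∈ Function.periodicPts redistribute :=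
    Function.mk_mem_periodicPts (by omega) hpJ
  have hq_eq : q = Function.minimalPeriod redistribute (redistribute^[J] mem) := by
    rcases Nat.le_total J M with hJM | hMJ
    · have hy : redistribute^[M] mem = redistribute^[M - J] (redistribute^[J] mem) := by
        rw [← Function.iterate_add_apply]
        congr 1
        omega
      rw [hqdef, hy, Function.minimalPeriod_apply_iterate hJ_mem]
    · have hy : redistribute^[J] mem = redistribute^[J - M] (redistribute^[M] mem) := by
        rw [← Function.iterate_add_apply]
        congr 1
        omega
      rw [hy, Function.minimalPeriod_apply_iterate hy_mem]
  have hqp : q = p := by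
    rw [hq_eq]
    have hdvd := Function.IsPeriodicPt.minimalPeriod_dvd hpJ
    have hle : Function.minimalPeriod redistribute (redistribute^[J] mem) ≤ p :=
      Nat.le_of_dvd (by omega) hdvd
    have hpos : 0 < Function.minimalPeriod redistribute (redistribute^[J] mem) :=
      Function.IsPeriodicPt.minimalPeriod_pos (by omega) hpJ
    by_contra hne2
    have hlt : Function.minimalPeriod redistribute (redistribute^[J] mem) < p :=
      lt_of_le_of_ne hle hne2
    have hcol2 : redistribute^[J + Function.minimalPeriod redistribute (redistribute^[J] mem)] mem
        = redistribute^[J] mem := by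
      rw [add_comm, Function.iterate_add_apply]
      exact congrArg _ rfl |>.trans (Function.iterate_minimalPeriod)
    have hfind := Nat.find_min' hex
      ⟨J, by omega, hcol2.symm⟩
    omega
  -- B computes q
  have hcyc := cycleLen_eq (redistribute^[M] mem) q hqdef hy_mem (fuelBound mem) 1
    le_rfl (by omega) (by omega)
  have hB : unloop_alt mem = (q : Int) := by
    have hfast : redistribute (redistribute mem) = redistribute^[2 * 1] mem := by
      rw [show 2 * 1 = 1 + 1 from rfl, Function.iterate_add_apply]
      simp
    have hslow : redistribute mem = redistribute^[1] mem := by simp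
    have hcur : redistribute (redistribute^[M] mem)
        = redistribute^[1] (redistribute^[M] mem) := by simp
    show cycleLen (fuelBound mem)
      (redistribute (floydMeet (fuelBound mem) (redistribute mem) (redistribute (redistribute mem))))
      (floydMeet (fuelBound mem) (redistribute mem) (redistribute (redistribute mem))) 1 = (q : Int)
    rw [hfast, hslow, hmeet, hcur]
    simpa using hcyc
  rw [hA, hB]
  omega
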